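-- pv_equiv track=rewrite | github.com/Lokeshsalunkhe22/Striver-100-Coding-Question-in-Python | string/6.rmv_char.py | remove_char
-- ===== SOURCE A (Python) =====
-- def remove_char(s):
--     result = ""
--
--     for i in range(len(s)):
--         ascii_value = ord(s[i])
--
--         if (65 <= ascii_value <= 90) or (97 <= ascii_value <= 122):
--             result += s[i]
--
--     """for char in input_str:
--         if char.isalpha(): #using predefined function
--             result += char"""
--
--     return result
-- ===== SOURCE B (Python) =====
-- import re
--
-- def remove_char(s):
--     return re.sub(r'[^A-Za-z]', '', s)
-- ===== Notes on version B (the rewrite author's own statement) =====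
-- stated objective: idiomatic
-- what changed: Replaces the explicit index loop with ord() range tests and quadratic string accumulation by a single regex substitution deleting every non-ASCII-letter character.
import Mathlib
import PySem

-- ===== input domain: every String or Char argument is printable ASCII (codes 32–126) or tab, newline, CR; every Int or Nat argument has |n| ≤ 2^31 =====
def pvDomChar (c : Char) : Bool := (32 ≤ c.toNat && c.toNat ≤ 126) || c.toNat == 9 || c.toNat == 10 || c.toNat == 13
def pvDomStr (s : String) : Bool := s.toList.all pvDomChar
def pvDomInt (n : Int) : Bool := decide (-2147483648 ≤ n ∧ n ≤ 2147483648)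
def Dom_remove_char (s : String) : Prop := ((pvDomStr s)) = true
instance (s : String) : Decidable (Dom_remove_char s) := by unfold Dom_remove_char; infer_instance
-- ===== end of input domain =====

-- B replaces A's index loop with ord() tests and string accumulation by a regex
-- substitution deleting every non-ASCII-letter character (idiomatic; same result).

-- ===== PORT A =====
-- index loop over range(len(s)); result += s[i] when ord(s[i]) is in A–Z or a–z
def remove_char (s : String) : String :=
  let cs := s.toList
  let result :=
    (PySem.List.pyRange 0 (PySem.Str.len s) 1).foldl
      (fun result i =>
        let c := PySem.List.pyGetD cs i ' '
        let ascii_value : Int := (c.toNat : Int)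
        if ((65 ≤ ascii_value && ascii_value ≤ 90) || (97 ≤ ascii_value && ascii_value ≤ 122))
        then result ++ [c] else result)
      []
  String.mk result

-- ===== PORT B =====
-- re.sub(r'[^A-Za-z]', '', s): keep exactly the characters matching the class [A-Za-z]
def pyIsAsciiLetter (c : Char) : Bool :=
  (65 ≤ c.toNat && c.toNat ≤ 90) || (97 ≤ c.toNat && c.toNat ≤ 122)

def remove_char_alt (s : String) : String :=
  String.mk (s.toList.filter pyIsAsciiLetter)

-- ===== PRECONDITION & SPEC =====
def Spec_remove_char (s : String) (out : String) : Prop := out = remove_char_alt s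
instance (s : String) (out : String) : Decidable (Spec_remove_char s out) := by unfold Spec_remove_char; infer_instance

-- ===== CLAIM =====
def Claim_equal_remove_char : Prop := ∀ (s : String), Dom_remove_char s → Spec_remove_char s (remove_char s)

-- ===== LEMMAS AND PROOFS =====
theorem pv_cond_eq (c : Char) :
    ((65 ≤ (c.toNat : Int) && (c.toNat : Int) ≤ 90) ||
     (97 ≤ (c.toNat : Int) && (c.toNat : Int) ≤ 122)) = pyIsAsciiLetter c := by
  simp only [pyIsAsciiLetter]
  by_cases h1 : 65 ≤ c.toNat <;> by_cases h2 : c.toNat ≤ 90 <;>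
    by_cases h3 : 97 ≤ c.toNat <;> by_cases h4 : c.toNat ≤ 122 <;>
    simp [h1, h2, h3, h4]

theorem pv_foldl_filter (l acc : List Char) :
    l.foldl (fun r c =>
      if ((65 ≤ (c.toNat : Int) && (c.toNat : Int) ≤ 90) ||
          (97 ≤ (c.toNat : Int) && (c.toNat : Int) ≤ 122))
      then r ++ [c] else r) acc = acc ++ l.filter pyIsAsciiLetter := by
  induction l generalizing acc with
  | nil => simp
  | cons x xs ih =>
    rw [List.foldl_cons, List.filter_cons, pv_cond_eq x]
    by_cases h : pyIsAsciiLetter x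
    · rw [if_pos h, if_pos h, ih (acc ++ [x]), List.append_assoc]
      rfl
    · rw [if_neg h, if_neg h, ih acc]

-- ===== VERDICT =====
theorem remove_char_spec : Claim_equal_remove_char := by
  intro s _
  unfold Spec_remove_char remove_char remove_char_alt
  dsimp only
  rw [PySem.Str.len_eq, PySem.List.foldl_pyRange_zero_pyGetD' s.toList ' '
      (fun result c =>
        if ((65 ≤ (c.toNat : Int) && (c.toNat : Int) ≤ 90) ||
            (97 ≤ (c.toNat : Int) && (c.toNat : Int) ≤ 122))
        then result ++ [c] else result) []]
  rw [pv_foldl_filter s.toList []]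
  simp
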